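-- pv_equiv track=rewrite | github.com/zzsfornlp/zmsp | tasks/zdpar/stat2/helper_decode.py | fdec_right
-- ===== SOURCE A (Python) =====
-- def fdec_right(fun_masks, **kwargs):
--     slen = len(fun_masks)
--     ret = [0] * slen
--     prev_content_idx = -1
--     prev_fun_list = []
--     for widx, is_fun in enumerate(fun_masks):
--         if is_fun:
--             prev_fun_list.append(widx)
--         else:
--             for w in prev_fun_list:
--                 ret[w] = widx+1
--             prev_fun_list.clear()
--             prev_content_idx = widx
--     # attach the rest
--     for w in prev_fun_list:
--         ret[w] = prev_content_idx+1
--     return ret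
-- ===== SOURCE B (Python) =====
-- def fdec_right(fun_masks, **kwargs):
--     n = len(fun_masks)
--     # reverse pass: next_content[i] = index of nearest content word at position >= i, or -1
--     next_content = [-1] * n
--     nxt = -1
--     for i in range(n - 1, -1, -1):
--         if not fun_masks[i]:
--             nxt = i
--         next_content[i] = nxt
--     # forward pass
--     ret = []
--     last = -1
--     for i, is_fun in enumerate(fun_masks):
--         if is_fun:
--             ret.append(next_content[i] + 1 if next_content[i] != -1 else last + 1)
--         else:
--             last = i
--             ret.append(0)
--     return ret
-- ===== Notes on version B (the rewrite author's own statement) =====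
-- stated objective: alternative
-- what changed: Replaces A's deferred mutation (buffering pending function-word indices and writing them into a preallocated array when the next content word arrives, with a final flush) by a precomputed reverse-pass suffix table next_content plus a forward pass that appends each answer directly (falling back to the last content word on the left when no content word follows).
import Mathlib
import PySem

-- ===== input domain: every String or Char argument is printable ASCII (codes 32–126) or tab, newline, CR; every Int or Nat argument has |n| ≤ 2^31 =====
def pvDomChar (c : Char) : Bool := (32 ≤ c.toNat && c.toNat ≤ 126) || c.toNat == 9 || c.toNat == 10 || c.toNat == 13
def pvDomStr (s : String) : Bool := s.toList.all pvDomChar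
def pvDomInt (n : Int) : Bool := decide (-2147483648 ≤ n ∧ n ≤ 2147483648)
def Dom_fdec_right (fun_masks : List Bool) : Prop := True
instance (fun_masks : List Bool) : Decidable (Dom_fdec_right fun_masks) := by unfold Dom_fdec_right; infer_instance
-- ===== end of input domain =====

-- B replaces A's pending-list buffering + array mutation by a precomputed suffix table of
-- nearest content indices plus a direct forward pass (alternative decomposition, same cost).

-- ===== PORT A =====
-- `for w in prev_fun_list: ret[w] = v` (used twice in A)
def fdecSetPending (ret : List Int) (pfl : List Nat) (v : Int) : List Int :=
  pfl.foldl (fun r w => r.set w v) ret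

-- the main `for widx, is_fun in enumerate(fun_masks)` loop; state (ret, prev_content_idx, prev_fun_list)
def fdecLoop : List Bool → Nat → List Int → Int → List Nat → (List Int × Int × List Nat)
  | [], _, ret, pci, pfl => (ret, pci, pfl)
  | b :: bs, widx, ret, pci, pfl =>
    if b then fdecLoop bs (widx + 1) ret pci (pfl ++ [widx])
    else fdecLoop bs (widx + 1) (fdecSetPending ret pfl ((widx : Int) + 1)) (widx : Int) []

def fdec_right (fun_masks : List Bool) : List Int :=
  let st := fdecLoop fun_masks 0 (List.replicate fun_masks.length (0 : Int)) (-1) []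
  fdecSetPending st.1 st.2.2 (st.2.1 + 1)

-- ===== PORT B =====
-- reverse pass: next_content[i] = nearest content index ≥ i, or -1 (computed suffix-first)
def fdecNextContent : Int → List Bool → List Int
  | _, [] => []
  | i, b :: bs =>
    let tail := fdecNextContent (i + 1) bs
    (if b then tail.headD (-1) else i) :: tail

-- forward pass: consume masks and next_content in lockstep, tracking last content on the left
def fdecForward : Int → Int → List Bool → List Int → List Int
  | _, _, [], _ => []
  | _, _, _ :: _, [] => []
  | last, i, b :: bs, v :: vs =>
    if b then (if v ≠ -1 then v + 1 else last + 1) :: fdecForward last (i + 1) bs vs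
    else 0 :: fdecForward i (i + 1) bs vs

def fdec_right_alt (fun_masks : List Bool) : List Int :=
  fdecForward (-1) 0 fun_masks (fdecNextContent 0 fun_masks)

-- ===== PRECONDITION & SPEC =====
def Spec_fdec_right (fun_masks : List Bool) (out : List Int) : Prop := out = fdec_right_alt fun_masks
instance (fun_masks : List Bool) (out : List Int) : Decidable (Spec_fdec_right fun_masks out) := by unfold Spec_fdec_right; infer_instance

-- ===== CLAIM (what is proved, stated in full; the proofs are below) =====
def Claim_equal_fdec_right : Prop := ∀ (fun_masks : List Bool), Dom_fdec_right fun_masks → Spec_fdec_right fun_masks (fdec_right fun_masks)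

-- ===== LEMMAS AND PROOFS =====

-- proof-side name for A's final flush (definitionally what fdec_right does with the loop state)
def fdecFlush (st : List Int × Int × List Nat) : List Int :=
  fdecSetPending st.1 st.2.2 (st.2.1 + 1)

-- index of first content word in bs, positions counted from i; -1 if none
def fci : Int → List Bool → Int
  | _, [] => -1
  | i, b :: bs => if b then fci (i + 1) bs else i

-- common reference form of both programs' result
def idealF : Int → Int → List Bool → List Int
  | _, _, [] => []
  | last, i, true :: bs =>
      (if fci (i + 1) bs = -1 then last + 1 else fci (i + 1) bs + 1) :: idealF last (i + 1) bs
  | _, i, false :: bs => 0 :: idealF i (i + 1) bs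

-- the fallback value written into a pending slot
def fvalF (pci : Int) (i : Int) (bs : List Bool) : Int :=
  (if fci i bs = -1 then pci else fci i bs) + 1

theorem headD_fdecNextContent (bs : List Bool) (i : Int) :
    (fdecNextContent i bs).headD (-1) = fci i bs := by
  induction bs generalizing i with
  | nil => simp [fdecNextContent, fci]
  | cons b bs ih =>
    cases b with
    | false => simp [fdecNextContent, fci]
    | true => simpa [fdecNextContent, fci] using ih (i + 1)

theorem forward_eq_ideal (bs : List Bool) (last i : Int) :
    fdecForward last i bs (fdecNextContent i bs) = idealF last i bs := by
  induction bs generalizing last i with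
  | nil => simp [fdecForward, idealF]
  | cons b bs ih =>
    cases b with
    | false => simp [fdecForward, fdecNextContent, idealF, ih]
    | true =>
      simp only [fdecNextContent, fdecForward, if_true, idealF]
      rw [headD_fdecNextContent, ih]
      by_cases h : fci (i + 1) bs = -1 <;> simp [h]

theorem length_fdecSetPending (pfl : List Nat) (ret : List Int) (v : Int) :
    (fdecSetPending ret pfl v).length = ret.length := by
  induction pfl generalizing ret with
  | nil => rfl
  | cons w pfl ih =>
    have h := ih (ret.set w v)
    simp only [fdecSetPending, List.foldl_cons] at h ⊢
    rw [h, List.length_set]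

theorem fdecSetPending_append (pfl : List Nat) (r0 ys : List Int) (v : Int)
    (h : ∀ w ∈ pfl, w < r0.length) :
    fdecSetPending (r0 ++ ys) pfl v = fdecSetPending r0 pfl v ++ ys := by
  induction pfl generalizing r0 with
  | nil => rfl
  | cons w pfl ih =>
    have hw : w < r0.length := h w (by simp)
    simp only [fdecSetPending, List.foldl_cons] at *
    rw [List.set_append_left _ _ hw]
    exact ih (r0.set w v) (by simpa [List.length_set] using fun x hx => h x (by simp [hx]))

theorem fdecSetPending_snoc (pfl : List Nat) (ret : List Int) (w : Nat) (v : Int) :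
    fdecSetPending ret (pfl ++ [w]) v = (fdecSetPending ret pfl v).set w v := by
  simp [fdecSetPending, List.foldl_append]

theorem fdecLoop_main (bs : List Bool) (i : Nat) (r0 : List Int) (pci : Int) (pfl : List Nat)
    (hlen : r0.length = i) (hpfl : ∀ w ∈ pfl, w < i) :
    fdecFlush (fdecLoop bs i (r0 ++ List.replicate bs.length 0) pci pfl) =
      fdecSetPending r0 pfl (fvalF pci (i : Int) bs) ++ idealF pci (i : Int) bs := by
  induction bs generalizing i r0 pci pfl with
  | nil => simp [fdecLoop, fdecFlush, idealF, fvalF, fci]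
  | cons b bs ih =>
    cases b with
    | true =>
      have hrepl : r0 ++ List.replicate (true :: bs).length (0 : Int)
          = (r0 ++ [0]) ++ List.replicate bs.length 0 := by
        simp [List.replicate_succ]
      have hpfl' : ∀ w ∈ pfl ++ [i], w < i + 1 := by
        intro w hw
        rcases List.mem_append.mp hw with h | h
        · exact Nat.lt_succ_of_lt (hpfl w h)
        · simp at h; omega
      have h1 := ih (i + 1) (r0 ++ [0]) pci (pfl ++ [i]) (by simp [hlen]) hpfl'
      have hstep : fdecLoop (true :: bs) i (r0 ++ List.replicate (true :: bs).length 0) pci pfl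
          = fdecLoop bs (i + 1) ((r0 ++ [0]) ++ List.replicate bs.length 0) pci (pfl ++ [i]) := by
        rw [show fdecLoop (true :: bs) i (r0 ++ List.replicate (true :: bs).length 0) pci pfl
              = fdecLoop bs (i + 1) (r0 ++ List.replicate (true :: bs).length 0) pci (pfl ++ [i])
            from rfl, hrepl]
      rw [hstep, h1]
      have hcast : (((i + 1 : Nat)) : Int) = (i : Int) + 1 := by push_cast; ring
      rw [hcast]
      have hF : fvalF pci ((i : Nat) : Int) (true :: bs) = fvalF pci ((i : Int) + 1) bs := by
        simp [fvalF, fci]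
      have hideal : idealF pci ((i : Nat) : Int) (true :: bs)
          = fvalF pci ((i : Int) + 1) bs :: idealF pci ((i : Int) + 1) bs := by
        by_cases h : fci ((i : Int) + 1) bs = -1 <;> simp [idealF, fvalF, h]
      rw [hF, hideal]
      have hlt : ∀ w ∈ pfl, w < r0.length := by simpa [hlen] using hpfl
      rw [fdecSetPending_snoc, fdecSetPending_append pfl r0 [0] _ hlt]
      have hsetlen : (fdecSetPending r0 pfl (fvalF pci ((i : Int) + 1) bs)).length = i := by
        rw [length_fdecSetPending, hlen]
      rw [List.set_append_right _ _ (by rw [hsetlen])]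
      simp [hsetlen]
    | false =>
      have hlt : ∀ w ∈ pfl, w < r0.length := by simpa [hlen] using hpfl
      have hlt' : ∀ w ∈ pfl, w < (r0 ++ [0]).length := by
        intro w hw; have := hlt w hw; simp; omega
      have hrepl : fdecSetPending (r0 ++ List.replicate (false :: bs).length (0 : Int)) pfl ((i : Int) + 1)
          = (fdecSetPending r0 pfl ((i : Int) + 1) ++ [0]) ++ List.replicate bs.length 0 := by
        rw [show r0 ++ List.replicate (false :: bs).length (0 : Int)
              = (r0 ++ [0]) ++ List.replicate bs.length 0 by simp [List.replicate_succ],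
          fdecSetPending_append pfl (r0 ++ [0]) _ _ hlt',
          fdecSetPending_append pfl r0 [0] _ hlt]
      have h1 := ih (i + 1) (fdecSetPending r0 pfl ((i : Int) + 1) ++ [0]) (i : Int) []
        (by simp [length_fdecSetPending, hlen]) (by simp)
      have hstep : fdecLoop (false :: bs) i (r0 ++ List.replicate (false :: bs).length 0) pci pfl
          = fdecLoop bs (i + 1)
              ((fdecSetPending r0 pfl ((i : Int) + 1) ++ [0]) ++ List.replicate bs.length 0)
              (i : Int) [] := by
        rw [show fdecLoop (false :: bs) i (r0 ++ List.replicate (false :: bs).length 0) pci pfl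
              = fdecLoop bs (i + 1)
                  (fdecSetPending (r0 ++ List.replicate (false :: bs).length 0) pfl ((i : Int) + 1))
                  (i : Int) [] from rfl, hrepl]
      rw [hstep, h1]
      have hne : ((i : Nat) : Int) ≠ -1 := by omega
      have hFv : fvalF pci ((i : Nat) : Int) (false :: bs) = (i : Int) + 1 := by
        simp [fvalF, fci, hne]
      have hcast : (((i + 1 : Nat)) : Int) = (i : Int) + 1 := by push_cast; ring
      rw [hcast, hFv]
      simp [fdecSetPending, idealF]

-- ===== VERDICT (by name: the statement is the Claim_ definition above) =====
theorem fdec_right_spec : Claim_equal_fdec_right := by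
  intro l _
  unfold Spec_fdec_right fdec_right fdec_right_alt
  have h := fdecLoop_main l 0 [] (-1) [] rfl (by simp)
  simp only [Nat.cast_zero, List.nil_append] at h
  rw [forward_eq_ideal]
  calc fdecFlush (fdecLoop l 0 (List.replicate l.length 0) (-1) []) =
      fdecSetPending [] [] (fvalF (-1) 0 l) ++ idealF (-1) 0 l := h
    _ = idealF (-1) 0 l := by simp [fdecSetPending]
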